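-- pv_equiv track=rewrite | github.com/windshadow233/mahjong | checker.py | _id2str
-- ===== SOURCE A (Python) =====
-- from typing import List, Iterable
--
-- def _id2str(ids: Iterable[int]):
--     m = p = s = z = ''
--     for id_ in ids:
--         if 0 <= id_ < 9:
--             m += str(id_ + 1)
--         elif 9 <= id_ < 18:
--             p += str(id_ - 8)
--         elif 18 <= id_ < 27:
--             s += str(id_ - 17)
--         elif 27 <= id_ < 34:
--             z += str(id_ - 26)
--         else:
--             raise ValueError(f'Wrong ID: {id_}!')
--     res = ''
--     if m:
--         res += ''.join(sorted(m)) + 'm'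
--     if p:
--         res += ''.join(sorted(p)) + 'p'
--     if s:
--         res += ''.join(sorted(s)) + 's'
--     if z:
--         res += ''.join(sorted(z)) + 'z'
--     return res
-- ===== SOURCE B (Python) =====
-- def _id2str(ids):
--     counts = [0] * 34
--     for id_ in ids:
--         if not 0 <= id_ < 34:
--             raise ValueError(f'Wrong ID: {id_}!')
--         counts[id_] += 1
--
--     def block(lo, n, suffix):
--         part = ''.join(str(d + 1) * counts[lo + d] for d in range(n))
--         return part + suffix if part else ''
--
--     return block(0, 9, 'm') + block(9, 9, 'p') + block(18, 9, 's') + block(27, 7, 'z')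
-- ===== Notes on version B (the rewrite author's own statement) =====
-- stated objective: alternative
-- what changed: Replaced per-suit string accumulation plus four comparison sorts with a single-pass counting sort into a fixed 34-slot count array and a table-driven reconstruction over the four suit ranges.
import Mathlib
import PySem

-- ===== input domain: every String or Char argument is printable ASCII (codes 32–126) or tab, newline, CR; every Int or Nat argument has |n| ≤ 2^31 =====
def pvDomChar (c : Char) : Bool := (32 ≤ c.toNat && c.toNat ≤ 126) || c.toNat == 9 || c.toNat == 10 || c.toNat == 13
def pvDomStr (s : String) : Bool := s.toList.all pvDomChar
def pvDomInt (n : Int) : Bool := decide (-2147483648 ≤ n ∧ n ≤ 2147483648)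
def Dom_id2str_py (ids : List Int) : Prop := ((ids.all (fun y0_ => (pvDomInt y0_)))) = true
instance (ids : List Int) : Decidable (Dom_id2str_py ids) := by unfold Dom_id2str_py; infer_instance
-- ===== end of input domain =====

-- B replaces A's per-suit string accumulation + four comparison sorts by a one-pass counting
-- sort into a 34-slot count array plus a table-driven reconstruction (alternative algorithm).

-- ===== PORT A =====
-- the for-loop over ids with its four string accumulators; none = ValueError on a bad id
def pvLoopA : List Int → List Char → List Char → List Char → List Char →
    Option (List Char × List Char × List Char × List Char)
  | [], m, p, s, z => some (m, p, s, z)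
  | id :: rest, m, p, s, z =>
    if 0 ≤ id ∧ id < 9 then pvLoopA rest (m ++ PySem.Int.toChars (id + 1)) p s z
    else if 9 ≤ id ∧ id < 18 then pvLoopA rest m (p ++ PySem.Int.toChars (id - 8)) s z
    else if 18 ≤ id ∧ id < 27 then pvLoopA rest m p (s ++ PySem.Int.toChars (id - 17)) z
    else if 27 ≤ id ∧ id < 34 then pvLoopA rest m p s (z ++ PySem.Int.toChars (id - 26))
    else none

def id2str_py (ids : List Int) : String :=
  match pvLoopA ids [] [] [] [] with
  | none => ""   -- ValueError: unreachable under Pre_id2str_py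
  | some (m, p, s, z) =>
    String.ofList
      ((if m ≠ [] then PySem.List.sorted m (fun c => c) ++ ['m'] else []) ++
       (if p ≠ [] then PySem.List.sorted p (fun c => c) ++ ['p'] else []) ++
       (if s ≠ [] then PySem.List.sorted s (fun c => c) ++ ['s'] else []) ++
       (if z ≠ [] then PySem.List.sorted z (fun c => c) ++ ['z'] else []))

-- ===== PORT B =====
-- the counting loop of Source B: counts[id_] += 1, none = ValueError on a bad id
-- (id.toNat is exact: the branch guarantees 0 ≤ id)
def pvLoopB : List Int → List Int → Option (List Int)
  | [], counts => some counts
  | id :: rest, counts =>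
    if 0 ≤ id ∧ id < 34 then pvLoopB rest (counts.set id.toNat (counts.getD id.toNat 0 + 1))
    else none

-- block(lo, n, suffix) of Source B: str(d+1) * counts[lo+d] joined over d in range(n)
def pvBlock (counts : List Int) (lo n : Nat) (suffix : Char) : List Char :=
  let part := (List.range n).flatMap
    (fun d => (List.replicate (counts.getD (lo + d) 0).toNat (PySem.Int.toChars ((d : Int) + 1))).flatten)
  if part = [] then [] else part ++ [suffix]

def id2str_py_alt (ids : List Int) : String :=
  match pvLoopB ids (List.replicate 34 0) with
  | none => ""   -- ValueError: unreachable under Pre_id2str_py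
  | some counts =>
    String.ofList (pvBlock counts 0 9 'm' ++ pvBlock counts 9 9 'p' ++
               pvBlock counts 18 9 's' ++ pvBlock counts 27 7 'z')

-- ===== PRECONDITION & SPEC =====
-- Pre_ excludes exactly the inputs with an id outside [0, 34), on which A raises ValueError.
def Pre_id2str_py (ids : List Int) : Prop := ∀ id ∈ ids, 0 ≤ id ∧ id < 34
instance (ids : List Int) : Decidable (Pre_id2str_py ids) := by unfold Pre_id2str_py; infer_instance
def pvWitness_id2str_py : List Int := [3, 1, 1, 9, 33, 27, 20]

def Spec_id2str_py (ids : List Int) (out : String) : Prop := out = id2str_py_alt ids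
instance (ids : List Int) (out : String) : Decidable (Spec_id2str_py ids out) := by unfold Spec_id2str_py; infer_instance

-- ===== CLAIM (what is proved, stated in full; the proofs are below) =====
def Claim_equal_id2str_py : Prop := ∀ (ids : List Int), Dom_id2str_py ids → Pre_id2str_py ids → Spec_id2str_py ids (id2str_py ids)

-- ===== LEMMAS AND PROOFS =====

-- digit character '1'..'9' for k = 1..9
def pvDig (k : Nat) : Char := Char.ofNat (48 + k)

theorem pvDig_inj : ∀ a < 11, ∀ b < 11, pvDig a = pvDig b → a = b := by decide

theorem pvDig_le : ∀ a < 11, ∀ b < 11, a ≤ b → pvDig a ≤ pvDig b := by decide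

theorem toChars_small (k : Int) (h1 : 1 ≤ k) (h2 : k ≤ 9) :
    PySem.Int.toChars k = [pvDig k.toNat] := by
  interval_cases k <;> decide

-- A's per-suit accumulator as filter + map
def pvSuitA (ids : List Int) (lo n : Nat) : List Char :=
  (ids.filter (fun id => decide ((lo : Int) ≤ id ∧ id < (lo : Int) + n))).map
    (fun id => pvDig ((id - (lo : Int) + 1)).toNat)

-- B's per-suit part, with counts replaced by List.count
def pvPart (ids : List Int) (lo n : Nat) : List Char :=
  (List.range n).flatMap (fun d => List.replicate (ids.count ((lo + d : Nat) : Int)) (pvDig (d + 1)))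

theorem pvSuitA_cons_pos {id : Int} {rest : List Int} {lo n : Nat}
    (h : (lo : Int) ≤ id ∧ id < (lo : Int) + n) :
    pvSuitA (id :: rest) lo n = pvDig ((id - (lo : Int) + 1)).toNat :: pvSuitA rest lo n := by
  unfold pvSuitA
  rw [List.filter_cons]
  simp [h.1, h.2]

theorem pvSuitA_cons_neg {id : Int} {rest : List Int} {lo n : Nat}
    (h : ¬((lo : Int) ≤ id ∧ id < (lo : Int) + n)) :
    pvSuitA (id :: rest) lo n = pvSuitA rest lo n := by
  unfold pvSuitA
  rw [List.filter_cons]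
  simp [h]

theorem pvLoopA_eq (ids : List Int) (h : ∀ id ∈ ids, 0 ≤ id ∧ id < 34) :
    ∀ m p s z, pvLoopA ids m p s z =
      some (m ++ pvSuitA ids 0 9, p ++ pvSuitA ids 9 9, s ++ pvSuitA ids 18 9, z ++ pvSuitA ids 27 7) := by
  induction ids with
  | nil => intro m p s z; simp [pvLoopA, pvSuitA]
  | cons id rest ih =>
    have hid := h id List.mem_cons_self
    have hrest : ∀ i ∈ rest, 0 ≤ i ∧ i < 34 := fun i hi => h i (List.mem_cons_of_mem _ hi)
    intro m p s z
    by_cases h1 : 0 ≤ id ∧ id < 9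
    · simp only [pvLoopA, if_pos h1]
      rw [ih hrest,
        pvSuitA_cons_pos (lo := 0) (n := 9) (by push_cast; omega),
        pvSuitA_cons_neg (lo := 9) (n := 9) (by push_cast; omega),
        pvSuitA_cons_neg (lo := 18) (n := 9) (by push_cast; omega),
        pvSuitA_cons_neg (lo := 27) (n := 7) (by push_cast; omega),
        toChars_small (id + 1) (by omega) (by omega)]
      simp
    · by_cases h2 : 9 ≤ id ∧ id < 18
      · simp only [pvLoopA, if_neg h1, if_pos h2]
        rw [ih hrest,
          pvSuitA_cons_neg (lo := 0) (n := 9) (by push_cast; omega),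
          pvSuitA_cons_pos (lo := 9) (n := 9) (by push_cast; omega),
          pvSuitA_cons_neg (lo := 18) (n := 9) (by push_cast; omega),
          pvSuitA_cons_neg (lo := 27) (n := 7) (by push_cast; omega),
          toChars_small (id - 8) (by omega) (by omega)]
        simp
        congr 1
        omega
      · by_cases h3 : 18 ≤ id ∧ id < 27
        · simp only [pvLoopA, if_neg h1, if_neg h2, if_pos h3]
          rw [ih hrest,
            pvSuitA_cons_neg (lo := 0) (n := 9) (by push_cast; omega),
            pvSuitA_cons_neg (lo := 9) (n := 9) (by push_cast; omega),
            pvSuitA_cons_pos (lo := 18) (n := 9) (by push_cast; omega),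
            pvSuitA_cons_neg (lo := 27) (n := 7) (by push_cast; omega),
            toChars_small (id - 17) (by omega) (by omega)]
          simp
          congr 1
          omega
        · have h4 : 27 ≤ id ∧ id < 34 := by omega
          simp only [pvLoopA, if_neg h1, if_neg h2, if_neg h3, if_pos h4]
          rw [ih hrest,
            pvSuitA_cons_neg (lo := 0) (n := 9) (by push_cast; omega),
            pvSuitA_cons_neg (lo := 9) (n := 9) (by push_cast; omega),
            pvSuitA_cons_neg (lo := 18) (n := 9) (by push_cast; omega),
            pvSuitA_cons_pos (lo := 27) (n := 7) (by push_cast; omega),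
            toChars_small (id - 26) (by omega) (by omega)]
          simp
          congr 1
          omega

theorem pvPart_mem {ids : List Int} {lo n : Nat} {x : Char} (h : x ∈ pvPart ids lo n) :
    ∃ d, d < n ∧ x = pvDig (d + 1) := by
  simp only [pvPart, List.mem_flatMap, List.mem_range, List.mem_replicate] at h
  obtain ⟨d, hd, _, hx⟩ := h
  exact ⟨d, hd, hx⟩

theorem pvPart_count_zero (ids : List Int) (lo n : Nat) (c : Char)
    (hc : ∀ d, d < n → c ≠ pvDig (d + 1)) : (pvPart ids lo n).count c = 0 := by
  rw [List.count_eq_zero]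
  intro hmem
  obtain ⟨d, hd, hx⟩ := pvPart_mem hmem
  exact hc d hd hx

theorem pvPart_succ (ids : List Int) (lo n : Nat) :
    pvPart ids lo (n + 1) =
      pvPart ids lo n ++ List.replicate (ids.count ((lo + n : Nat) : Int)) (pvDig (n + 1)) := by
  simp [pvPart, List.range_succ]

theorem pvPart_count (ids : List Int) (lo n : Nat) (hn : n ≤ 9) (d0 : Nat) (hd : d0 < n) :
    (pvPart ids lo n).count (pvDig (d0 + 1)) = ids.count ((lo + d0 : Nat) : Int) := by
  induction n with
  | zero => omega
  | succ n ih =>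
    rw [pvPart_succ, List.count_append]
    rcases Nat.lt_or_ge d0 n with h | h
    · rw [ih (by omega) h, List.count_replicate]
      have hne : ¬ (pvDig (n + 1) == pvDig (d0 + 1)) = true := by
        simp only [beq_iff_eq]
        intro he
        have := pvDig_inj (n + 1) (by omega) (d0 + 1) (by omega) he
        omega
      simp [hne]
    · have hd0 : d0 = n := by omega
      rw [pvPart_count_zero ids lo n _ (fun d hdn he => by
        have := pvDig_inj (d0 + 1) (by omega) (d + 1) (by omega) he
        omega), List.count_replicate]
      simp [hd0]

theorem pvSuitA_count_zero (ids : List Int) (lo n : Nat) (c : Char)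
    (hc : ∀ d, d < n → c ≠ pvDig (d + 1)) : (pvSuitA ids lo n).count c = 0 := by
  rw [List.count_eq_zero]
  intro hmem
  simp only [pvSuitA, List.mem_map, List.mem_filter, decide_eq_true_eq] at hmem
  obtain ⟨id, ⟨_, hlo, hhi⟩, hx⟩ := hmem
  refine hc ((id - (lo : Int) + 1).toNat - 1) (by omega) ?_
  have h1 : (id - (lo : Int) + 1).toNat - 1 + 1 = (id - (lo : Int) + 1).toNat := by omega
  rw [h1]; exact hx.symm

theorem pvSuitA_count (ids : List Int) (lo n : Nat) (hn : n ≤ 9) (d0 : Nat) (hd : d0 < n) :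
    (pvSuitA ids lo n).count (pvDig (d0 + 1)) = ids.count ((lo + d0 : Nat) : Int) := by
  unfold pvSuitA
  rw [List.count_eq_countP, List.countP_map, List.countP_filter, List.count_eq_countP]
  apply List.countP_congr
  intro id _
  simp only [Function.comp, beq_iff_eq, Bool.and_eq_true, decide_eq_true_eq]
  constructor
  · rintro ⟨he, hlo, hhi⟩
    have := pvDig_inj _ (by omega) (d0 + 1) (by omega) he
    omega
  · intro he
    have hid : id = ((lo + d0 : Nat) : Int) := he
    constructor
    · congr 1; omega
    · constructor <;> omega

theorem pvPart_perm (ids : List Int) (lo n : Nat) (hn : n ≤ 9) :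
    (pvPart ids lo n).Perm (pvSuitA ids lo n) := by
  rw [List.perm_iff_count]
  intro c
  by_cases h : ∃ d, d < n ∧ c = pvDig (d + 1)
  · obtain ⟨d, hd, rfl⟩ := h
    rw [pvPart_count ids lo n hn d hd, pvSuitA_count ids lo n hn d hd]
  · simp only [not_exists, not_and] at h
    rw [pvPart_count_zero ids lo n c h, pvSuitA_count_zero ids lo n c h]

theorem pvPart_pairwise (ids : List Int) (lo n : Nat) (hn : n ≤ 9) :
    (pvPart ids lo n).Pairwise (fun a b => a ≤ b) := by
  induction n with
  | zero => simp [pvPart]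
  | succ n ih =>
    rw [pvPart_succ, List.pairwise_append]
    refine ⟨ih (by omega), ?_, ?_⟩
    · rw [List.pairwise_replicate]; right; exact le_refl _
    · intro a ha b hb
      obtain ⟨d, hd, rfl⟩ := pvPart_mem ha
      rw [(List.eq_of_mem_replicate hb : b = pvDig (n + 1))]
      exact pvDig_le (d + 1) (by omega) (n + 1) (by omega) (by omega)

theorem sorted_suit (ids : List Int) (lo n : Nat) (hn : n ≤ 9) :
    PySem.List.sorted (pvSuitA ids lo n) (fun c => c) = pvPart ids lo n := by
  exact PySem.List.sorted_id_eq_of_perm_of_pairwise _ _ (pvPart_perm ids lo n hn) (pvPart_pairwise ids lo n hn)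

theorem pvFlattenRepSingleton (k : Nat) (c : Char) :
    (List.replicate k [c]).flatten = List.replicate k c := by
  induction k with
  | zero => rfl
  | succ k ih => simp [List.replicate_succ, ih]

theorem pvLoopB_eq (ids : List Int) (h : ∀ id ∈ ids, 0 ≤ id ∧ id < 34) :
    ∀ counts : List Int, counts.length = 34 →
      ∃ r, pvLoopB ids counts = some r ∧ r.length = 34 ∧
        ∀ j : Nat, r.getD j 0 = counts.getD j 0 + ids.count (j : Int) := by
  induction ids with
  | nil => exact fun counts hlen => ⟨counts, rfl, hlen, by simp⟩
  | cons id rest ih =>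
    intro counts hlen
    have hid := h id List.mem_cons_self
    have hrest : ∀ i ∈ rest, 0 ≤ i ∧ i < 34 := fun i hi => h i (List.mem_cons_of_mem _ hi)
    obtain ⟨r, hr, hrlen, hget⟩ :=
      ih hrest (counts.set id.toNat (counts.getD id.toNat 0 + 1)) (by simp [hlen])
    refine ⟨r, ?_, hrlen, ?_⟩
    · simp only [pvLoopB, if_pos hid]; exact hr
    · intro j
      rw [hget j, List.count_cons, List.getD_eq_getElem?_getD, List.getElem?_set]
      by_cases hj : id.toNat = j
      · have hidj : (id == ((j : Nat) : Int)) = true := by simp; omega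
        rw [if_pos hj, if_pos (by omega : id.toNat < counts.length), hidj]
        subst hj
        simp [List.getD_eq_getElem?_getD]
        omega
      · have hidj : (id == ((j : Nat) : Int)) = false := by simp; omega
        rw [if_neg hj, hidj, ← List.getD_eq_getElem?_getD]
        simp

theorem pvBlock_eq (ids : List Int) (counts : List Int) (lo n : Nat) (hn : n ≤ 9) (suffix : Char)
    (hc : ∀ j : Nat, counts.getD j 0 = ids.count (j : Int)) :
    pvBlock counts lo n suffix = if pvPart ids lo n = [] then [] else pvPart ids lo n ++ [suffix] := by
  unfold pvBlock
  have hpart : (List.range n).flatMap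
      (fun d => (List.replicate (counts.getD (lo + d) 0).toNat (PySem.Int.toChars ((d : Int) + 1))).flatten)
      = pvPart ids lo n := by
    unfold pvPart
    rw [List.flatMap_def, List.flatMap_def]
    congr 1
    apply List.map_congr_left
    intro d hd
    rw [List.mem_range] at hd
    rw [toChars_small ((d : Int) + 1) (by omega) (by omega), hc (lo + d),
      pvFlattenRepSingleton]
    have h1 : ((d : Int) + 1).toNat = d + 1 := by omega
    have h2 : ((ids.count ((lo + d : Nat) : Int) : Int)).toNat = ids.count ((lo + d : Nat) : Int) := by
      omega
    rw [h1, h2]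
  rw [hpart]

theorem suit_assemble (ids : List Int) (lo n : Nat) (hn : n ≤ 9) (sfx : Char) :
    (if pvSuitA ids lo n ≠ [] then PySem.List.sorted (pvSuitA ids lo n) (fun c => c) ++ [sfx] else [])
      = if pvPart ids lo n = [] then [] else pvPart ids lo n ++ [sfx] := by
  have hperm := pvPart_perm ids lo n hn
  by_cases he : pvSuitA ids lo n = []
  · have hp : pvPart ids lo n = [] := by rw [he] at hperm; exact hperm.eq_nil
    simp [he, hp]
  · have hp : pvPart ids lo n ≠ [] := by
      intro hpp; rw [hpp] at hperm; exact he hperm.symm.eq_nil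
    rw [if_pos he, if_neg hp, sorted_suit ids lo n hn]

-- ===== VERDICT (by name: the statement is the Claim_ definition above) =====
theorem id2str_py_spec : Claim_equal_id2str_py := by
  intro ids _ hpre
  unfold Spec_id2str_py id2str_py id2str_py_alt
  have hpre' : ∀ id ∈ ids, 0 ≤ id ∧ id < 34 := hpre
  rw [pvLoopA_eq ids hpre' [] [] [] []]
  obtain ⟨r, hr, hrlen, hget⟩ := pvLoopB_eq ids hpre' (List.replicate 34 0) (by simp)
  rw [hr]
  simp only [List.nil_append]
  have hz : ∀ j : Nat, (List.replicate 34 (0 : Int)).getD j 0 = 0 := by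
    intro j
    rw [List.getD_eq_getElem?_getD, List.getElem?_replicate]
    split <;> rfl
  have hc : ∀ j : Nat, r.getD j 0 = ids.count (j : Int) := by
    intro j
    rw [hget j, hz j, zero_add]
  rw [pvBlock_eq ids r 0 9 (by omega) 'm' hc, pvBlock_eq ids r 9 9 (by omega) 'p' hc,
    pvBlock_eq ids r 18 9 (by omega) 's' hc, pvBlock_eq ids r 27 7 (by omega) 'z' hc]
  rw [suit_assemble ids 0 9 (by omega) 'm', suit_assemble ids 9 9 (by omega) 'p',
    suit_assemble ids 18 9 (by omega) 's', suit_assemble ids 27 7 (by omega) 'z']
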